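-- pv_equiv track=rewrite | github.com/luklieb/visualization | Assignment 1/matrix.py | scaleMat
-- ===== SOURCE A (Python) =====
-- def scaleMat( s ):
--     matrix = ()
--     length = len(s)
--     for i in range(0, length):
--         bla = length-i
--         matrix += ( (0,)*i + (s[i],) + (0,)*bla, )
--     matrix += ( (0,)*length + (1,),)
--     return matrix
-- ===== SOURCE B (Python) =====
-- def scaleMat(s):
--     d = tuple(s) + (1,)
--     n = len(d)
--     return tuple(tuple(d[i] if i == j else 0 for j in range(n)) for i in range(n))
-- ===== Notes on version B (the rewrite author's own statement) =====
-- stated objective: simpler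
-- what changed: B precomputes the diagonal vector d = s + [1] and builds the matrix with one element-wise nested comprehension (d[i] if i == j else 0) instead of A's per-row concatenation of zero-runs plus a separately appended last row.
import Mathlib
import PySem

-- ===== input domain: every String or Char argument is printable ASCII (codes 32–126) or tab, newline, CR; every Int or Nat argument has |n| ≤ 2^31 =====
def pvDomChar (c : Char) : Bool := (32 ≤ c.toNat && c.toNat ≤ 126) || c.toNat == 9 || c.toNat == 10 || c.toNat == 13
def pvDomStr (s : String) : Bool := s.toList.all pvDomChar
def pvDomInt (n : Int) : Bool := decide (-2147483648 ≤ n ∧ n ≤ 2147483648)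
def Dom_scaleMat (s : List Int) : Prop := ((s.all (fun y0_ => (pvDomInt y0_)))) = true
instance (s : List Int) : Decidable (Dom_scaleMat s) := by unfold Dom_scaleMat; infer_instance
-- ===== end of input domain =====

-- B builds the matrix element-wise from the precomputed diagonal d = s + [1] instead of
-- concatenating zero-runs per row; objective: simpler. (Return-value equivalence only.)

-- ===== PORT A =====
def scaleMat (s : List Int) : List (List Int) :=
  let length : Int := PySem.List.len s
  let matrix : List (List Int) :=
    (PySem.List.pyRange 0 length 1).foldl
      (fun matrix i =>
        let bla : Int := length - i
        matrix ++ [List.replicate i.toNat (0 : Int) ++ [PySem.List.pyGetD s i 0] ++ List.replicate bla.toNat (0 : Int)])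
      []
  matrix ++ [List.replicate length.toNat (0 : Int) ++ [1]]

-- ===== PORT B =====
def scaleMat_alt (s : List Int) : List (List Int) :=
  let d : List Int := s ++ [1]
  let n : Nat := d.length
  (List.range n).map (fun i => (List.range n).map (fun j => if i = j then d.getD j 0 else 0))

-- ===== PRECONDITION & SPEC =====
def Spec_scaleMat (s : List Int) (out : List (List Int)) : Prop := out = scaleMat_alt s
instance (s : List Int) (out : List (List Int)) : Decidable (Spec_scaleMat s out) := by unfold Spec_scaleMat; infer_instance

-- ===== CLAIM (what is proved, stated in full; the proofs are below) =====
def Claim_equal_scaleMat : Prop := ∀ (s : List Int), Dom_scaleMat s → Spec_scaleMat s (scaleMat s)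

-- ===== LEMMAS AND PROOFS =====

-- ===== VERDICT (by name: the statement is the Claim_ definition above) =====
-- one-hot row: mapping "if i = j then f j else 0" over range m is zeros around f i
lemma onehot_row (f : Nat → Int) (m i : Nat) (hi : i < m) :
    (List.range m).map (fun j => if i = j then f j else 0) =
      List.replicate i 0 ++ f i :: List.replicate (m - 1 - i) 0 := by
  apply List.ext_getElem
  · simp; omega
  · intro k hk hk'
    simp only [List.getElem_map, List.getElem_range]
    rcases lt_trichotomy k i with h | h | h
    · rw [List.getElem_append_left (by simpa using h)]
      simp [List.getElem_replicate, Nat.ne_of_gt h]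
    · subst h
      rw [List.getElem_append_right (by simp)]
      simp
    · rw [List.getElem_append_right (by simpa using Nat.le_of_lt h)]
      rw [List.getElem_cons]
      have : k - i ≠ 0 := by omega
      simp [this, Nat.ne_of_lt h]

theorem scaleMat_spec : Claim_equal_scaleMat := by
  intro s _
  unfold Spec_scaleMat
  have hB : scaleMat_alt s = (List.range (s.length + 1)).map
      (fun i => List.replicate i 0 ++ (s ++ [1]).getD i 0 :: List.replicate (s.length - i) 0) := by
    unfold scaleMat_alt
    simp only [List.length_append, List.length_cons, List.length_nil, Nat.zero_add]
    apply List.map_congr_left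
    intro i hi
    rw [onehot_row _ _ i (List.mem_range.mp hi)]
    congr 2
  rw [hB]
  unfold scaleMat
  simp only [PySem.List.len_eq, PySem.List.pyRange_one, Int.sub_zero, Int.toNat_natCast,
    List.foldl_map, PySem.List.foldl_append_singleton_eq_map, List.nil_append]
  rw [List.range_succ, List.map_append]
  congr 1
  · apply List.map_congr_left
    intro k hk
    have hk' : k < s.length := List.mem_range.mp hk
    have h1 : ((0 : Int) + (k : Int)).toNat = k := by omega
    have h2 : ((s.length : Int) - ((0 : Int) + (k : Int))).toNat = s.length - k := by omega
    have h3 : PySem.List.pyGetD s ((0 : Int) + (k : Int)) 0 = s.getD k 0 := by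
      rw [Int.zero_add]; exact PySem.List.pyGetD_natCast s k 0
    have h4 : (s ++ [(1 : Int)]).getD k 0 = s.getD k 0 := by
      simp [List.getD, List.getElem?_append_left hk']
    rw [h1, h2, h3, h4]
    simp
  · simp [List.getD]
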